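-- pv_equiv track=rewrite | github.com/FarahElAlem/Rogue-detection-system | switch_connector.py | _parse_single_interface_status
-- ===== SOURCE A (Python) =====
-- from typing import List, Dict, Optional
--
-- def _parse_single_interface_status(output: str, port_name: str) -> List[Dict]:
--     """Parse single interface detailed status"""
--     status_info = {
--         'port': port_name,
--         'admin_status': 'unknown',
--         'operational_status': 'unknown',
--         'description': ''
--     }
--
--     for line in output.split('\n'):
--         if 'administratively down' in line.lower():
--             status_info['admin_status'] = 'disabled'
--             status_info['operational_status'] = 'down'
--         elif 'line protocol is up' in line.lower():
--             status_info['admin_status'] = 'enabled'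
--             status_info['operational_status'] = 'up'
--         elif 'line protocol is down' in line.lower():
--             status_info['admin_status'] = 'enabled'
--             status_info['operational_status'] = 'down'
--
--     return [status_info]
-- ===== SOURCE B (Python) =====
-- from typing import List, Dict, Optional
--
-- # Marker table: (substring, admin_status, operational_status), in A's priority order.
-- _MARKERS = [
--     ('administratively down', 'disabled', 'down'),
--     ('line protocol is up', 'enabled', 'up'),
--     ('line protocol is down', 'enabled', 'down'),
-- ]
--
-- def _parse_single_interface_status(output: str, port_name: str) -> List[Dict]:
--     """Table-driven reverse scan: the last matching line decides the status."""
--     admin, oper = 'unknown', 'unknown'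
--     for line in reversed(output.split('\n')):
--         low = line.lower()
--         hit = next(((a, o) for m, a, o in _MARKERS if m in low), None)
--         if hit is not None:
--             admin, oper = hit
--             break
--     return [{
--         'port': port_name,
--         'admin_status': admin,
--         'operational_status': oper,
--         'description': '',
--     }]
-- ===== Notes on version B (the rewrite author's own statement) =====
-- stated objective: alternative
-- what changed: A's forward scan mutating a dict with an inline if/elif chain on every line is replaced by a table-driven reverse search: a marker table, a search for the last line containing any marker (stopping there), and a result dict built once as a literal from the found pair.
import Mathlib
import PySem

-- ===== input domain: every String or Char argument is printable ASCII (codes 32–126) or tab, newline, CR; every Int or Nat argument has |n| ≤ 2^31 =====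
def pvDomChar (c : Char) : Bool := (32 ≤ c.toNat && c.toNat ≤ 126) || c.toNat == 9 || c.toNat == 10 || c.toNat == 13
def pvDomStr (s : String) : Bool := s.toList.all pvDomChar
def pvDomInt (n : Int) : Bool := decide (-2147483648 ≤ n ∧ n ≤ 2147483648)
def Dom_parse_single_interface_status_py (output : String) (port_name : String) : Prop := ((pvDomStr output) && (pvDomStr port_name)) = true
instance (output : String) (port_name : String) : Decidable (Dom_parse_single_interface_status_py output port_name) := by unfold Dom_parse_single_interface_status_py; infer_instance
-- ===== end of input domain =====

-- B replaces A's forward dict-mutating scan with an if/elif chain by a table-driven reverse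
-- search that stops at the last matching line and builds the result list once as a literal.


-- ===== PORT A =====
-- A's initial status_info dict
def statusDefault (port_name : String) : PySem.Dict String String :=
  ((((PySem.Dict.empty.insert "port" port_name).insert "admin_status" "unknown").insert
      "operational_status" "unknown").insert "description" "")

-- A's loop body: each matching line overwrites admin/operational status (if/elif chain)
def stepA (d : PySem.Dict String String) (line : String) : PySem.Dict String String :=
  if PySem.Str.isIn "administratively down" (PySem.Str.lower line) then
    (d.insert "admin_status" "disabled").insert "operational_status" "down"
  else if PySem.Str.isIn "line protocol is up" (PySem.Str.lower line) then
    (d.insert "admin_status" "enabled").insert "operational_status" "up"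
  else if PySem.Str.isIn "line protocol is down" (PySem.Str.lower line) then
    (d.insert "admin_status" "enabled").insert "operational_status" "down"
  else d

def parse_single_interface_status_py (output : String) (port_name : String) : List (List (String × String)) :=
  let status_info := statusDefault port_name
  let status_info := ((PySem.Chars.splitOn output.toList ['\n']).map String.ofList).foldl stepA status_info
  [status_info.items]

-- ===== PORT B =====
-- B's marker table: (substring, admin_status, operational_status), in A's priority order
def markerTable : List (String × String × String) :=
  [("administratively down", "disabled", "down"),
   ("line protocol is up", "enabled", "up"),
   ("line protocol is down", "enabled", "down")]

-- the first marker of the table contained in the lowered line (Python's next(... , None))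
def lineHit (line : String) : Option (String × String) :=
  markerTable.findSome? (fun t => if PySem.Str.isIn t.1 (PySem.Str.lower line) then some t.2 else none)

-- B's reversed loop with break: first hit of the (reversed) line list
def lastHit : List String → Option (String × String)
  | [] => none
  | l :: rest => match lineHit l with | some p => some p | none => lastHit rest

def parse_single_interface_status_py_alt (output : String) (port_name : String) : List (List (String × String)) :=
  let p := (lastHit ((PySem.Chars.splitOn output.toList ['\n']).map String.ofList).reverse).getD ("unknown", "unknown")
  [[("port", port_name), ("admin_status", p.1), ("operational_status", p.2), ("description", "")]]

-- ===== PRECONDITION & SPEC =====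
def Spec_parse_single_interface_status_py (output : String) (port_name : String) (out : List (List (String × String))) : Prop := out = parse_single_interface_status_py_alt output port_name
instance (output : String) (port_name : String) (out : List (List (String × String))) : Decidable (Spec_parse_single_interface_status_py output port_name out) := by unfold Spec_parse_single_interface_status_py; infer_instance

-- ===== CLAIM (what is proved, stated in full; the proofs are below) =====
def Claim_equal_parse_single_interface_status_py : Prop := ∀ (output : String) (port_name : String), Dom_parse_single_interface_status_py output port_name → Spec_parse_single_interface_status_py output port_name (parse_single_interface_status_py output port_name)

-- ===== LEMMAS AND PROOFS =====

-- overwrite both status fields of a dict (proof-side abbreviation)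
def ins (d : PySem.Dict String String) (a o : String) : PySem.Dict String String :=
  (d.insert "admin_status" a).insert "operational_status" o

lemma stepA_eq (d : PySem.Dict String String) (line : String) :
    stepA d line = match lineHit line with | some p => ins d p.1 p.2 | none => d := by
  unfold stepA lineHit markerTable ins
  simp only [List.findSome?]
  split_ifs <;> rfl

lemma ins_ins (pn a o x y : String) :
    ins (ins (statusDefault pn) a o) x y = ins (statusDefault pn) x y := rfl

lemma lastHit_append (l : List String) (x : String) :
    lastHit (l ++ [x]) = match lastHit l with | some p => some p | none => lineHit x := by
  induction l with
  | nil => simp only [List.nil_append, lastHit]; cases lineHit x <;> rfl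
  | cons y l ih =>
    simp only [List.cons_append, lastHit, ih]
    cases lineHit y <;> rfl

lemma foldl_stepA (pn : String) (l : List String) (d : PySem.Dict String String)
    (hd : ∀ x y, ins d x y = ins (statusDefault pn) x y) :
    l.foldl stepA d =
      match lastHit l.reverse with
      | some p => ins (statusDefault pn) p.1 p.2
      | none => d := by
  induction l generalizing d with
  | nil => rfl
  | cons x xs ih =>
    rw [List.foldl_cons, List.reverse_cons, lastHit_append, stepA_eq]
    cases h : lineHit x with
    | some p =>
      rw [ih (ins d p.1 p.2) (by intro u v; rw [hd p.1 p.2, ins_ins])]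
      cases hf : lastHit xs.reverse with
      | some q => rfl
      | none => simp [hd]
    | none =>
      rw [ih d hd]
      cases hf : lastHit xs.reverse with
      | some q => rfl
      | none => rfl

lemma items_default (pn : String) :
    (statusDefault pn).items =
      [("port", pn), ("admin_status", "unknown"), ("operational_status", "unknown"), ("description", "")] := rfl

lemma items_ins (pn a o : String) :
    (ins (statusDefault pn) a o).items =
      [("port", pn), ("admin_status", a), ("operational_status", o), ("description", "")] := rfl

-- ===== VERDICT (by name: the statement is the Claim_ definition above) =====
theorem parse_single_interface_status_py_spec : Claim_equal_parse_single_interface_status_py := by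
  intro output port_name _
  unfold Spec_parse_single_interface_status_py parse_single_interface_status_py
    parse_single_interface_status_py_alt
  simp only []
  rw [foldl_stepA port_name _ _ (fun _ _ => rfl)]
  cases h : lastHit ((PySem.Chars.splitOn output.toList ['\n']).map String.ofList).reverse with
  | some p => simp [items_ins, Option.getD]
  | none => simp [items_default, Option.getD]
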